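-- pv_equiv track=rewrite | github.com/badis-ouaret/CryptoLab | Model/chiffreur.py | textToStringsArray2
-- ===== SOURCE A (Python) =====
-- def textToStringsArray2(text):
--     strings = []
--     mot = ""
--
--     for char in text:
--
--         if char.isnumeric() :
--             mot +=char
--         else:
--             if len(mot)>0 :
--                 strings.append(mot)
--             mot = ""
--     if len(mot) :
--         strings.append(mot)
--     return strings
-- ===== SOURCE B (Python) =====
-- def textToStringsArray2(text):
--     # Mask every non-numeric character to a space, then let str.split()
--     # return the maximal runs of numeric characters.
--     return "".join(c if c.isnumeric() else " " for c in text).split()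
-- ===== Notes on version B (the rewrite author's own statement) =====
-- stated objective: idiomatic
-- what changed: Replaced the explicit accumulator loop with its end-of-string flush by masking every non-numeric character to a space and letting str.split() return the maximal numeric runs.
import Mathlib
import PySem

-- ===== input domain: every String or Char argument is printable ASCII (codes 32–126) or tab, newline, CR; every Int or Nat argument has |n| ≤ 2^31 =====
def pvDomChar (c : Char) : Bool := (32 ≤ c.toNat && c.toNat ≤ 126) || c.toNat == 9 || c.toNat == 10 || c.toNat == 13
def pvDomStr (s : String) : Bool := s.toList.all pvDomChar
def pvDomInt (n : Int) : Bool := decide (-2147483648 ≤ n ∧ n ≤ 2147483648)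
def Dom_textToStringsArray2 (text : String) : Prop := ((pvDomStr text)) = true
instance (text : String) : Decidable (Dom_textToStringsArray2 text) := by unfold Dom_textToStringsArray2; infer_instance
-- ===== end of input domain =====

-- B replaces A's accumulator-and-flush loop by masking non-numeric characters to
-- spaces and splitting on whitespace (objective: idiomatic; no speed claim).
-- On the ASCII domain Dom_, Python's char.isnumeric() is exactly PySem.Chars.isdigit.

-- ===== PORT A =====
-- literal transliteration of A's loop: state = (strings, mot), flush after the loop
def textToStringsArray2 (text : String) : List String :=
  let st := text.toList.foldl
    (fun (p : List String × String) char =>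
      if PySem.Chars.isdigit char then (p.1, p.2.push char)
      else if 0 < p.2.length then (p.1 ++ [p.2], "") else (p.1, ""))
    ([], "")
  if 0 < st.2.length then st.1 ++ [st.2] else st.1

-- ===== PORT B =====
-- "".join(c if c.isnumeric() else " " for c in text).split()
def textToStringsArray2_alt (text : String) : List String :=
  PySem.Str.split₀
    (String.ofList (text.toList.map (fun c => if PySem.Chars.isdigit c then c else ' ')))

-- ===== PRECONDITION & SPEC =====
def Spec_textToStringsArray2 (text : String) (out : List String) : Prop := out = textToStringsArray2_alt text
instance (text : String) (out : List String) : Decidable (Spec_textToStringsArray2 text out) := by unfold Spec_textToStringsArray2; infer_instance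

-- ===== CLAIM (what is proved, stated in full; the proofs are below) =====
def Claim_equal_textToStringsArray2 : Prop := ∀ (text : String), Dom_textToStringsArray2 text → Spec_textToStringsArray2 text (textToStringsArray2 text)

-- ===== LEMMAS AND PROOFS =====

-- a numeric character is never whitespace
theorem isspace_of_isdigit (c : Char) (h : PySem.Chars.isdigit c = true) :
    PySem.Chars.isspace c = false := by
  simp only [PySem.Chars.isdigit, Bool.and_eq_true, decide_eq_true_eq, Char.le_def] at h
  obtain ⟨h1, h2⟩ := h
  have h1n := UInt32.le_iff_toNat_le.mp h1
  have h2n := UInt32.le_iff_toNat_le.mp h2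
  have h0 : (Char.val (Char.ofNat 48)).toNat = 48 := by decide
  have h9 : (Char.val (Char.ofNat 57)).toNat = 57 := by decide
  simp only [show (0x30 : Char) = Char.ofNat 48 from rfl, show (0x39 : Char) = Char.ofNat 57 from rfl, h0, h9] at h1n h2n
  simp only [PySem.Chars.isspace, Bool.or_eq_false_iff, Bool.and_eq_false_iff,
    decide_eq_false_iff_not, Char.toNat]
  omega

-- the accumulator of split₀.go only collects finished words: it factors out
theorem go_acc (l : List Char) : ∀ cur acc,
    PySem.Chars.split₀.go l cur acc = acc.reverse ++ PySem.Chars.split₀.go l cur [] := by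
  induction l with
  | nil =>
    intro cur acc
    rw [PySem.Chars.split₀.go.eq_def, PySem.Chars.split₀.go.eq_def]
    rcases cur with _ | ⟨c, cur⟩ <;> simp
  | cons c rest ih =>
    intro cur acc
    rw [PySem.Chars.split₀.go.eq_def]
    conv_rhs => rw [PySem.Chars.split₀.go.eq_def]
    by_cases hs : PySem.Chars.isspace c
    · rcases cur with _ | ⟨d, cur⟩ <;> simp [hs]
      · exact ih [] acc
      · rw [ih [] ((cur.reverse ++ [d]) :: acc), ih [] [cur.reverse ++ [d]]]; simp
    · simp [hs]; exact ih (c :: cur) acc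

-- main invariant: A's loop started at (strings, mot) produces strings ++ (mask-and-split of the rest with pending run mot)
theorem main_inv (cs : List Char) : ∀ (strings : List String) (mot : String),
    (let st := cs.foldl
        (fun (p : List String × String) char =>
          if PySem.Chars.isdigit char then (p.1, p.2.push char)
          else if 0 < p.2.length then (p.1 ++ [p.2], "") else (p.1, ""))
        (strings, mot)
      if 0 < st.2.length then st.1 ++ [st.2] else st.1)
    = strings ++
      (PySem.Chars.split₀.go
        (cs.map (fun c => if PySem.Chars.isdigit c then c else ' '))
        mot.toList.reverse []).map String.ofList := by
  induction cs with
  | nil =>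
    intro strings mot
    simp only [List.foldl_nil, List.map_nil]
    rw [PySem.Chars.split₀.go.eq_def]
    rcases hm : mot.toList with _ | ⟨d, ds⟩
    · have : mot.length = 0 := by simp [← String.length_toList, hm]
      simp [this]
    · have : 0 < mot.length := by simp [← String.length_toList, hm]
      have hof : String.ofList (d :: ds) = mot := by rw [← hm]; simp
      simp [this, hof]
  | cons c rest ih =>
    intro strings mot
    simp only [List.foldl_cons, List.map_cons]
    by_cases hd : PySem.Chars.isdigit c
    · rw [PySem.Chars.split₀.go.eq_def]
      simp only [hd, if_true, isspace_of_isdigit c hd, Bool.false_eq_true, if_false]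
      have := ih strings (mot.push c)
      simpa [List.reverse_cons] using this
    · rw [PySem.Chars.split₀.go.eq_def]
      have hsp : PySem.Chars.isspace ' ' = true := by decide
      simp only [hd, Bool.false_eq_true, if_false, hsp, if_true]
      by_cases hm : 0 < mot.length
      · have hne : mot.toList ≠ [] := by
          intro h; rw [← String.length_toList, h] at hm; simp at hm
        have hcur : (mot.toList.reverse.isEmpty) = false := by
          simp [List.isEmpty_eq_false_iff, hne]
        simp only [hcur, Bool.false_eq_true, if_false, hm, if_true]
        rw [go_acc _ [] [mot.toList.reverse.reverse]]
        have := ih (strings ++ [mot]) ""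
        simp only [String.toList_empty, List.reverse_nil] at this ⊢
        simp [this]
      · have hlen : mot.toList.length = 0 := by rw [← String.length_toList] at hm; omega
        have hnil : mot.toList = [] := List.eq_nil_of_length_eq_zero hlen
        simp only [hnil, List.reverse_nil, List.isEmpty_nil, if_true, hm, if_false]
        have := ih strings ""
        simpa using this

-- ===== VERDICT (by name: the statement is the Claim_ definition above) =====
theorem textToStringsArray2_spec : Claim_equal_textToStringsArray2 := by
  intro text _
  unfold Spec_textToStringsArray2 textToStringsArray2 textToStringsArray2_alt
  have h := main_inv text.toList [] ""
  simpa [PySem.Str.split₀, PySem.Chars.split₀] using h
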